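-- pv_equiv track=rewrite | github.com/fadhil-11/BLOOMS-BOT | question_validator.py | _tokenize_with_acronyms
-- ===== SOURCE A (Python) =====
-- from typing import List, Optional, Set, Tuple
--
-- def _tokenize_with_acronyms(text: str) -> List[str]:
--     """
--     Tokenize text, lowercasing words while preserving ALL-CAPS acronyms.
--     """
--     tokens = []
--     current = []
--     for ch in text:
--         if ch.isalnum():
--             current.append(ch)
--         else:
--             if current:
--                 token = "".join(current)
--                 tokens.append(_normalize_token(token))
--                 current = []
--     if current:
--         token = "".join(current)
--         tokens.append(_normalize_token(token))
--     return tokens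
--
-- def _normalize_token(token: str) -> str:
--     if _is_acronymish(token):
--         return token.upper()
--     return token.lower()
--
-- def _is_acronymish(token: str) -> bool:
--     if len(token) < 2:
--         return False
--     uppercase_count = sum(1 for ch in token if ch.isupper())
--     return uppercase_count >= 2
-- ===== SOURCE B (Python) =====
-- from typing import List
--
--
-- def _tokenize_with_acronyms(text: str) -> List[str]:
--     """Tokenize text, lowercasing words while preserving ALL-CAPS acronyms.
--
--     Staged: first blank out every non-alphanumeric character, then use
--     str.split() to extract the words, then normalize each word."""
--     sanitized = "".join(ch if ch.isalnum() else " " for ch in text)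
--     return [_normalize_token(token) for token in sanitized.split()]
--
--
-- def _normalize_token(token: str) -> str:
--     if _is_acronymish(token):
--         return token.upper()
--     return token.lower()
--
--
-- def _is_acronymish(token: str) -> bool:
--     if len(token) < 2:
--         return False
--     uppercase_count = sum(1 for ch in token if ch.isupper())
--     return uppercase_count >= 2
-- ===== Notes on version B (the rewrite author's own statement) =====
-- stated objective: alternative
-- what changed: Replaced the single-pass char loop with a mutable token buffer and trailing flush by two staged passes: first blank out every non-alphanumeric character, then str.split() the sanitized string and normalize each word.
import Mathlib
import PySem

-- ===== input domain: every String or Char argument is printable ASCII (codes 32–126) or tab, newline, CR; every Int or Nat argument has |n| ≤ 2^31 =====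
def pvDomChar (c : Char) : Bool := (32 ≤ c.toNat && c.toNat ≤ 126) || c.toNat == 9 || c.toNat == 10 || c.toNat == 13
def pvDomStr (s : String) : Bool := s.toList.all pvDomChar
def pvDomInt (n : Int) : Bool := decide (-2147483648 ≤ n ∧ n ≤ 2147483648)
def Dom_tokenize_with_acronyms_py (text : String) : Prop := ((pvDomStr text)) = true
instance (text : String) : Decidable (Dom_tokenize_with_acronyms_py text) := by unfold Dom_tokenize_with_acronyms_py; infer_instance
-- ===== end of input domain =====

-- B replaces A's single-pass char loop with its mutable buffer and trailing flush by two
-- staged passes: blank out every non-alphanumeric character, then split() and normalize words.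


-- ===== PORT A =====
-- shared helpers (same-module helpers used unchanged by both A and B, as in the Python)
def pvIsAcronymish (token : String) : Bool :=
  if PySem.Str.len token < 2 then false
  else
    let uppercase_count := token.toList.foldl (fun n ch => if PySem.Chars.isupper ch then n + 1 else n) 0
    2 ≤ uppercase_count

def pvNormalizeToken (token : String) : String :=
  if pvIsAcronymish token then PySem.Str.upper token else PySem.Str.lower token

-- one iteration of A's for-loop: state is (tokens, current)
def pvStep (st : List String × List Char) (ch : Char) : List String × List Char :=
  if PySem.Chars.isalnum ch then (st.1, st.2 ++ [ch])
  else if st.2 ≠ [] then (st.1 ++ [pvNormalizeToken (String.ofList st.2)], [])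
  else st

-- the trailing 'if current:' flush after the loop
def pvFinish (st : List String × List Char) : List String :=
  if st.2 ≠ [] then st.1 ++ [pvNormalizeToken (String.ofList st.2)] else st.1

def tokenize_with_acronyms_py (text : String) : List String :=
  pvFinish (text.toList.foldl pvStep ([], []))

-- ===== PORT B =====
-- staged: blank non-alnum chars, then sanitized.split(), then normalize each word
def tokenize_with_acronyms_py_alt (text : String) : List String :=
  let sanitized :=
    String.ofList (text.toList.map (fun ch => if PySem.Chars.isalnum ch then ch else ' '))
  (PySem.Str.split₀ sanitized).map pvNormalizeToken

-- ===== PRECONDITION & SPEC =====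
def Spec_tokenize_with_acronyms_py (text : String) (out : List String) : Prop := out = tokenize_with_acronyms_py_alt text
instance (text : String) (out : List String) : Decidable (Spec_tokenize_with_acronyms_py text out) := by unfold Spec_tokenize_with_acronyms_py; infer_instance

-- ===== CLAIM (what is proved, stated in full; the proofs are below) =====
def Claim_equal_tokenize_with_acronyms_py : Prop := ∀ (text : String), Dom_tokenize_with_acronyms_py text → Spec_tokenize_with_acronyms_py text (tokenize_with_acronyms_py text)

-- ===== LEMMAS AND PROOFS =====

-- A's remaining output from loop state `cur` on the remaining characters
def pvTokRest (cur : List Char) : List Char → List String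
  | [] => if cur = [] then [] else [pvNormalizeToken (String.ofList cur)]
  | c :: cs =>
      if PySem.Chars.isalnum c then pvTokRest (cur ++ [c]) cs
      else if cur = [] then pvTokRest [] cs
      else pvNormalizeToken (String.ofList cur) :: pvTokRest [] cs

theorem pvFoldl_tokRest (cs : List Char) : ∀ (tokens : List String) (cur : List Char),
    pvFinish (cs.foldl pvStep (tokens, cur)) = tokens ++ pvTokRest cur cs := by
  induction cs with
  | nil => intro tokens cur; by_cases h : cur = [] <;> simp [pvFinish, pvTokRest, h]
  | cons c cs ih =>
      intro tokens cur
      by_cases ha : PySem.Chars.isalnum c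
      · simp [List.foldl_cons, pvStep, ha, pvTokRest, ih]
      · by_cases h : cur = []
        · simp [List.foldl_cons, pvStep, ha, h, pvTokRest, ih]
        · simp [List.foldl_cons, pvStep, ha, h, pvTokRest, ih]

theorem pv_isspace_of_isalnum (c : Char) (h : PySem.Chars.isalnum c = true) :
    PySem.Chars.isspace c = false := by
  simp only [PySem.Chars.isalnum, PySem.Chars.isalpha, PySem.Chars.isupper, PySem.Chars.islower,
    PySem.Chars.isdigit, Char.le_def, UInt32.le_iff_toNat_le, Bool.or_eq_true, Bool.and_eq_true, decide_eq_true_eq] at h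
  simp only [PySem.Chars.isspace, Char.toNat, Bool.or_eq_false_iff, Bool.and_eq_false_iff,
    decide_eq_false_iff_not]
  have h1 : 'A'.val.toNat = 65 := rfl
  have h2 : 'Z'.val.toNat = 90 := rfl
  have h3 : 'a'.val.toNat = 97 := rfl
  have h4 : 'z'.val.toNat = 122 := rfl
  have h5 : '0'.val.toNat = 48 := rfl
  have h6 : '9'.val.toNat = 57 := rfl
  omega

theorem pv_isspace_space : PySem.Chars.isspace ' ' = true := by decide

-- the sanitizing map of B
def pvBlank (ch : Char) : Char := if PySem.Chars.isalnum ch then ch else ' '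

theorem pv_go_map (cs : List Char) : ∀ (cur : List Char) (acc : List (List Char)),
    (PySem.Chars.split₀.go (cs.map pvBlank) cur acc).map
        (fun t => pvNormalizeToken (String.ofList t)) =
      (acc.reverse.map (fun t => pvNormalizeToken (String.ofList t))) ++ pvTokRest cur.reverse cs := by
  induction cs with
  | nil =>
      intro cur acc
      by_cases h : cur = [] <;>
        simp [PySem.Chars.split₀.go, pvTokRest, h, List.isEmpty_iff]
  | cons c cs ih =>
      intro cur acc
      by_cases ha : PySem.Chars.isalnum c
      · have hs := pv_isspace_of_isalnum c ha
        simp only [List.map_cons, pvBlank, ha, if_pos]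
        rw [show PySem.Chars.split₀.go (c :: cs.map pvBlank) cur acc =
              PySem.Chars.split₀.go (cs.map pvBlank) (c :: cur) acc by
            simp [PySem.Chars.split₀.go, hs]]
        simp [ih, pvTokRest, ha]
      · simp only [List.map_cons, pvBlank, ha, if_neg, Bool.not_eq_true]
        by_cases h : cur = []
        · rw [show PySem.Chars.split₀.go (' ' :: cs.map pvBlank) cur acc =
                PySem.Chars.split₀.go (cs.map pvBlank) [] acc by
              simp [PySem.Chars.split₀.go, pv_isspace_space, h]]
          simp [ih, pvTokRest, ha, h]
        · rw [show PySem.Chars.split₀.go (' ' :: cs.map pvBlank) cur acc =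
                PySem.Chars.split₀.go (cs.map pvBlank) [] (cur.reverse :: acc) by
              simp [PySem.Chars.split₀.go, pv_isspace_space, List.isEmpty_iff, h]]
          simp [ih, pvTokRest, ha, h]

-- ===== VERDICT (by name: the statement is the Claim_ definition above) =====
theorem tokenize_with_acronyms_py_spec : Claim_equal_tokenize_with_acronyms_py := by
  intro text _
  unfold Spec_tokenize_with_acronyms_py tokenize_with_acronyms_py tokenize_with_acronyms_py_alt
  rw [pvFoldl_tokRest text.toList [] []]
  have h := pv_go_map text.toList [] []
  simp only [PySem.Str.split₀, PySem.Chars.split₀, List.map_map]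
  simpa [Function.comp] using h.symm
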